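-- pv_equiv track=rewrite | github.com/himanshu-hs3773/Daffodils.ai | poetry_generator.py.py | reverseNgrams
-- ===== SOURCE A (Python) =====
-- def reverseNgrams(tokens, n):
--     ngrams = []
--     for i in range(len(tokens)-1, 0+n-2, -1):
--         ngram = []
--         for j in range(i, i-n, -1):
--             ngram.append(tokens[j])
--         ngrams.append(ngram)
--     return ngrams
-- ===== SOURCE B (Python) =====
-- def reverseNgrams(tokens, n):
--     rev = list(reversed(tokens))
--     return [rev[s:s + n] for s in range(len(tokens) - n + 1)]
-- ===== Notes on version B (the rewrite author's own statement) =====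
-- stated objective: simpler
-- what changed: B reverses the token list once and takes forward sliding slices of length n, instead of A's backward index loop with an inner element-by-element append loop.
-- outside the precondition, e.g. on reverseNgrams(['a', 'b'], -1): A returns [[], [], [], []], B returns [['b'], [], [], []]
import Mathlib
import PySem

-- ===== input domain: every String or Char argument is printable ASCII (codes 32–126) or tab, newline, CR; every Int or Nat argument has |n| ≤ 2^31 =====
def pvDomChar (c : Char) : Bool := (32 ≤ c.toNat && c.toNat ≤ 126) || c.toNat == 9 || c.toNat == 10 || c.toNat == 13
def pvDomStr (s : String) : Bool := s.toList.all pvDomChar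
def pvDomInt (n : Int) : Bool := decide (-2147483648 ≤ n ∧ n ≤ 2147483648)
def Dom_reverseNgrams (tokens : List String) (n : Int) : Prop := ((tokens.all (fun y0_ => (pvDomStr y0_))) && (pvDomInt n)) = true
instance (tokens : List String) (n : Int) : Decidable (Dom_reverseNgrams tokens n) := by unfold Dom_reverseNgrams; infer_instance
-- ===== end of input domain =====

-- B reverses the token list once and takes forward sliding slices of length n instead of
-- A's backward index loop with an inner append loop; objective: simpler.

-- ===== PORT A =====
-- tokens[j] is always in range when Pre_ holds (for n ≥ 1, j ∈ [i-n+1, i] ⊆ [0, len-1];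
-- for n = 0 the inner loop is empty), so the pyGetD default "" is never used.
def reverseNgrams (tokens : List String) (n : Int) : List (List String) :=
  (PySem.List.pyRange ((tokens.length : Int) - 1) (0 + n - 2) (-1)).foldl
    (fun ngrams i =>
      ngrams ++ [(PySem.List.pyRange i (i - n) (-1)).foldl
        (fun ngram j => ngram ++ [PySem.List.pyGetD tokens j ""]) []])
    []

-- ===== PORT B =====
def reverseNgrams_alt (tokens : List String) (n : Int) : List (List String) :=
  let rev := tokens.reverse
  (PySem.List.pyRange 0 ((tokens.length : Int) - n + 1) 1).map
    (fun s => PySem.List.slice rev (some s) (some (s + n)))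

-- ===== PRECONDITION & SPEC =====
-- Pre_ excludes negative n: a negative n-gram size is outside the function's natural domain
-- (there A's backward ranges produce len-n+1 empty n-grams while B's slice stop n counts from the end).
def Pre_reverseNgrams (tokens : List String) (n : Int) : Prop := 0 ≤ n
instance (tokens : List String) (n : Int) : Decidable (Pre_reverseNgrams tokens n) := by unfold Pre_reverseNgrams; infer_instance
def pvWitness_reverseNgrams : List String × Int := (["a", "b", "c"], 2)

def Spec_reverseNgrams (tokens : List String) (n : Int) (out : List (List String)) : Prop := out = reverseNgrams_alt tokens n
instance (tokens : List String) (n : Int) (out : List (List String)) : Decidable (Spec_reverseNgrams tokens n out) := by unfold Spec_reverseNgrams; infer_instance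

-- ===== CLAIM (what is proved, stated in full; the proofs are below) =====
def Claim_equal_reverseNgrams : Prop := ∀ (tokens : List String) (n : Int), Dom_reverseNgrams tokens n → Pre_reverseNgrams tokens n → Spec_reverseNgrams tokens n (reverseNgrams tokens n)

-- ===== LEMMAS AND PROOFS =====

-- A's loops as nested maps over Nat ranges.
lemma reverseNgrams_eq_map (tokens : List String) (n : Int) :
    reverseNgrams tokens n =
      (List.range ((tokens.length : Int) - n + 1).toNat).map (fun (k : Nat) =>
        (List.range n.toNat).map (fun (m : Nat) =>
          PySem.List.pyGetD tokens ((tokens.length : Int) - 1 - (k : Int) - (m : Int)) "")) := by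
  unfold reverseNgrams
  simp only [PySem.List.foldl_append_singleton_eq_map, List.nil_append,
    PySem.List.pyRange_neg_one, List.map_map]
  have h1 : ((tokens.length : Int) - 1 - (0 + n - 2)).toNat
      = ((tokens.length : Int) - n + 1).toNat := by omega
  rw [h1]
  apply List.map_congr_left
  intro k _
  have h2 : ((tokens.length : Int) - 1 - (k : Int)
      - ((tokens.length : Int) - 1 - (k : Int) - n)).toNat = n.toNat := by omega
  simp only [Function.comp]
  rw [h2]
  simp [Function.comp_def]

-- B as a map over the same Nat range.
lemma reverseNgrams_alt_eq_map (tokens : List String) (n : Int) :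
    reverseNgrams_alt tokens n =
      (List.range ((tokens.length : Int) - n + 1).toNat).map (fun (k : Nat) =>
        PySem.List.slice tokens.reverse (some (k : Int)) (some ((k : Int) + n))) := by
  unfold reverseNgrams_alt
  rw [PySem.List.pyRange_one, List.map_map]
  simp [Function.comp]

-- pointwise equality of the windows for 1 ≤ n
lemma window_eq (tokens : List String) (n : Int) (hn : 0 ≤ n) (k : Nat)
    (hk : k < ((tokens.length : Int) - n + 1).toNat) :
    (List.range n.toNat).map (fun (m : Nat) =>
        PySem.List.pyGetD tokens ((tokens.length : Int) - 1 - (k : Int) - (m : Int)) "") =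
      PySem.List.slice tokens.reverse (some (k : Int)) (some ((k : Int) + n)) := by
  have hkL : (k : Int) + n ≤ (tokens.length : Int) := by
    have := hk
    omega
  have hk0 : (0 : Int) ≤ (k : Int) := by positivity
  rw [PySem.List.slice_toNat tokens.reverse hk0 (by omega)]
  have hcnt : ((k : Int) + n).toNat - ((k : Int)).toNat = n.toNat := by omega
  rw [hcnt]
  apply List.ext_getElem
  · simp
    omega
  · intro m hm1 hm2
    simp only [List.getElem_map, List.getElem_range, List.getElem_take, List.getElem_drop]
    have hmn : m < n.toNat := by simpa using hm1
    have hbound : ((k : Int)).toNat + m < tokens.length := by omega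
    rw [List.getElem_reverse]
    rw [PySem.List.pyGetD_eq_getElem tokens "" (by omega) (by omega)]
    congr 1
    omega

-- ===== VERDICT (by name: the statement is the Claim_ definition above) =====
theorem reverseNgrams_spec : Claim_equal_reverseNgrams := by
  intro tokens n _ hn
  unfold Spec_reverseNgrams
  rw [reverseNgrams_eq_map, reverseNgrams_alt_eq_map]
  apply List.map_congr_left
  intro k hk
  exact window_eq tokens n hn k (List.mem_range.mp hk)
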